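-- pv_equiv track=rewrite | github.com/faro93/MOOC.python | Semaine.5/3.comprehension.liste/vigenère.py | createListes
-- ===== SOURCE A (Python) =====
-- import string
--
-- def createListes(clear, key):
--     if clear in string.ascii_uppercase:
--         key = key.upper()
--
--         # liste ordre alphabétique
--         a_orig = [lettre for lettre in string.ascii_uppercase]
--
--         # liste ordre alphabétique décalé de 'key'
--         a_key = [a_orig[(i+1+(ord(key)-ord('A')))-len(a_orig)]
--                     if i+1+(ord(key)-ord('A')) >= len(a_orig)
--                     else a_orig[(i+1+(ord(key)-ord('A')))]
--                 for (i, lettre) in enumerate(a_orig)]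
--     else:
--         key = key.lower()
--
--         # liste ordre alphabétique
--         a_orig = [lettre for lettre in string.ascii_lowercase]
--
--         # liste ordre alphabétique décalé de 'key'
--         a_key = [a_orig[(i+1+(ord(key)-ord('a')))-len(a_orig)]
--                     if i+1+(ord(key)-ord('a')) >= len(a_orig)
--                     else a_orig[(i+1+(ord(key)-ord('a')))]
--                 for (i, lettre) in enumerate(a_orig)]
--     return (a_orig, a_key)
-- ===== SOURCE B (Python) =====
-- import string
--
-- def createListes(clear, key):
--     if clear in string.ascii_uppercase:
--         alphabet, k = string.ascii_uppercase, key.upper()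
--     else:
--         alphabet, k = string.ascii_lowercase, key.lower()
--     a_orig = list(alphabet)
--     n = (1 + ord(k) - ord(alphabet[0])) % 26
--     return (a_orig, a_orig[n:] + a_orig[:n])
-- ===== Notes on version B (the rewrite author's own statement) =====
-- stated objective: simpler
-- what changed: Replaces the per-index enumerate comprehension with its conditional wrap-around indexing by computing one modular shift n = (1 + ord(key) - ord(base)) % 26 and rotating the alphabet with two slices a_orig[n:] + a_orig[:n].
import Mathlib
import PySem

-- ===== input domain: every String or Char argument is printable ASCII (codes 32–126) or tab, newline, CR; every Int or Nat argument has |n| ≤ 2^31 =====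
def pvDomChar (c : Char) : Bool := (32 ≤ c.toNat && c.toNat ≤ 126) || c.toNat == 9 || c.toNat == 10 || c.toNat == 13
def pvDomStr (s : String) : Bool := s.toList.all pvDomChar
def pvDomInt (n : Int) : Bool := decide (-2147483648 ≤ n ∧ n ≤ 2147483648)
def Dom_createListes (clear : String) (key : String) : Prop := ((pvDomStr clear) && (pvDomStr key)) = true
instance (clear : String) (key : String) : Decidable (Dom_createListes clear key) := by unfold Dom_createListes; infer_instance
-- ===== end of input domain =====

-- B replaces the per-index comprehension with conditional wrap-around indexing by a single
-- modular shift and a whole-list slice rotation (objective: simpler; return value only).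

-- ===== PORT A =====
-- string.ascii_uppercase / string.ascii_lowercase
def asciiUppercase : String := "ABCDEFGHIJKLMNOPQRSTUVWXYZ"
def asciiLowercase : String := "abcdefghijklmnopqrstuvwxyz"

-- ord(s): exact for length-1 strings; Python raises TypeError otherwise (excluded by Pre_)
def pyOrd (s : String) : Int :=
  match s.toList with
  | [c] => (c.toNat : Int)
  | _ => 0

-- the comprehension building a_key in A: per index i, conditional wrap-around indexing.
-- pyGet? is exact Python indexing (negative wrap); .getD "" is never hit under Pre_ (IndexError excluded).
def shiftedA (L : List String) (s : Int) : List String :=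
  (PySem.List.enumerate L).map (fun p =>
    if p.1 + 1 + s ≥ (L.length : Int) then
      (PySem.List.pyGet? L (p.1 + 1 + s - (L.length : Int))).getD ""
    else
      (PySem.List.pyGet? L (p.1 + 1 + s)).getD "")

def createListes (clear : String) (key : String) : List String × List String :=
  if PySem.Str.isIn clear asciiUppercase then
    let k := PySem.Str.upper key
    let aOrig := asciiUppercase.toList.map (fun c => String.ofList [c])
    (aOrig, shiftedA aOrig (pyOrd k - pyOrd "A"))
  else
    let k := PySem.Str.lower key
    let aOrig := asciiLowercase.toList.map (fun c => String.ofList [c])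
    (aOrig, shiftedA aOrig (pyOrd k - pyOrd "a"))

-- ===== PORT B =====
-- a_orig[n:] + a_orig[:n]
def rotated (L : List String) (n : Int) : List String :=
  PySem.List.slice L (some n) none ++ PySem.List.slice L none (some n)

def createListes_alt (clear : String) (key : String) : List String × List String :=
  let p := if PySem.Str.isIn clear asciiUppercase
           then (asciiUppercase, PySem.Str.upper key)
           else (asciiLowercase, PySem.Str.lower key)
  let aOrig := p.1.toList.map (fun c => String.ofList [c])
  let n := PySem.Int.mod (1 + pyOrd p.2 - ((((PySem.Str.pyGet? p.1 0).getD ' ').toNat : Int))) 26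
  (aOrig, rotated aOrig n)

-- ===== PRECONDITION & SPEC =====
-- the key as A's chosen branch normalises it (upper in the uppercase branch, lower otherwise)
def keyNorm (clear key : String) : String :=
  if PySem.Str.isIn clear asciiUppercase then PySem.Str.upper key else PySem.Str.lower key
-- ord of the branch's base letter 'A' / 'a'
def baseOf (clear : String) : Int :=
  if PySem.Str.isIn clear asciiUppercase then 65 else 97
-- code of the normalised key's first character
def keyOrd (clear key : String) : Int := (((keyNorm clear key).toList.headD ' ').toNat : Int)
-- Pre_ holds exactly where Python A returns: the normalised key is a single character whose
-- shift relative to 'A'/'a' lies in [-27, 25]; otherwise A raises TypeError (ord of a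
-- non-length-1 string) or IndexError (list index out of range).
def Pre_createListes (clear : String) (key : String) : Prop :=
  (keyNorm clear key).toList.length = 1 ∧
  -27 ≤ keyOrd clear key - baseOf clear ∧ keyOrd clear key - baseOf clear ≤ 25
instance (clear : String) (key : String) : Decidable (Pre_createListes clear key) := by
  unfold Pre_createListes; infer_instance

def pvWitness_createListes : String × String := ("A", "b")

def Spec_createListes (clear : String) (key : String) (out : List String × List String) : Prop := out = createListes_alt clear key
instance (clear : String) (key : String) (out : List String × List String) : Decidable (Spec_createListes clear key out) := by unfold Spec_createListes; infer_instance

-- ===== CLAIM (what is proved, stated in full; the proofs are below) =====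
def Claim_equal_createListes : Prop := ∀ (clear : String) (key : String), Dom_createListes clear key → Pre_createListes clear key → Spec_createListes clear key (createListes clear key)

-- ===== LEMMAS AND PROOFS =====

-- core: the conditional wrap-around comprehension equals the slice rotation, for each of the
-- two literal alphabets and every shift A survives
lemma shiftedA_upper (s : Int) (h1 : -27 ≤ s) (h2 : s ≤ 25) :
    shiftedA (asciiUppercase.toList.map (fun c => String.ofList [c])) s
      = rotated (asciiUppercase.toList.map (fun c => String.ofList [c])) (PySem.Int.mod (1 + s) 26) := by
  interval_cases s <;> decide

lemma shiftedA_lower (s : Int) (h1 : -27 ≤ s) (h2 : s ≤ 25) :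
    shiftedA (asciiLowercase.toList.map (fun c => String.ofList [c])) s
      = rotated (asciiLowercase.toList.map (fun c => String.ofList [c])) (PySem.Int.mod (1 + s) 26) := by
  interval_cases s <;> decide

-- ===== VERDICT (by name: the statement is the Claim_ definition above) =====
theorem createListes_spec : Claim_equal_createListes := by
  intro clear key _ hpre
  unfold Spec_createListes createListes createListes_alt
  obtain ⟨hlen, hlo, hhi⟩ := hpre
  by_cases hb : PySem.Str.isIn clear asciiUppercase = true
  · have hbc : PySem.Chars.isIn clear.toList asciiUppercase.toList = true := by simpa using hb
    have hkn : keyNorm clear key = PySem.Str.upper key := by simp [keyNorm, hbc]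
    have hbase : baseOf clear = 65 := by simp [baseOf, hbc]
    rw [hkn] at hlen
    obtain ⟨c, hc⟩ : ∃ c, (PySem.Str.upper key).toList = [c] := by
      cases h : (PySem.Str.upper key).toList with
      | nil => simp [h] at hlen
      | cons a t => cases t with
        | nil => exact ⟨a, rfl⟩
        | cons b u => simp [h] at hlen
    have hko : keyOrd clear key = (c.toNat : Int) := by simp [keyOrd, hkn, hc]
    rw [hko, hbase] at hlo hhi
    have hord : pyOrd (PySem.Str.upper key) = (c.toNat : Int) := by simp [pyOrd, hc]
    simp only [hb, if_true, hord]
    have h65 : pyOrd "A" = 65 := by decide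
    have hg : ((((PySem.Str.pyGet? asciiUppercase 0).getD ' ').toNat : Int)) = 65 := by decide
    rw [h65, hg]
    have := shiftedA_upper ((c.toNat : Int) - 65) (by omega) (by omega)
    have harg : 1 + (c.toNat : Int) - 65 = 1 + ((c.toNat : Int) - 65) := by ring
    rw [harg, ← this]
  · have hb' : PySem.Str.isIn clear asciiUppercase = false := by simpa using hb
    have hbc : PySem.Chars.isIn clear.toList asciiUppercase.toList = false := by simpa using hb'
    have hkn : keyNorm clear key = PySem.Str.lower key := by simp [keyNorm, hbc]
    have hbase : baseOf clear = 97 := by simp [baseOf, hbc]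
    rw [hkn] at hlen
    obtain ⟨c, hc⟩ : ∃ c, (PySem.Str.lower key).toList = [c] := by
      cases h : (PySem.Str.lower key).toList with
      | nil => simp [h] at hlen
      | cons a t => cases t with
        | nil => exact ⟨a, rfl⟩
        | cons b u => simp [h] at hlen
    have hko : keyOrd clear key = (c.toNat : Int) := by simp [keyOrd, hkn, hc]
    rw [hko, hbase] at hlo hhi
    have hord : pyOrd (PySem.Str.lower key) = (c.toNat : Int) := by simp [pyOrd, hc]
    simp only [hb', Bool.false_eq_true, if_false, hord]
    have h97 : pyOrd "a" = 97 := by decide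
    have hg : ((((PySem.Str.pyGet? asciiLowercase 0).getD ' ').toNat : Int)) = 97 := by decide
    rw [h97, hg]
    have := shiftedA_lower ((c.toNat : Int) - 97) (by omega) (by omega)
    have harg : 1 + (c.toNat : Int) - 97 = 1 + ((c.toNat : Int) - 97) := by ring
    rw [harg, ← this]
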